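-- pv_equiv track=rewrite | github.com/RickCarletti/P1---Dante | Lista 3/1142.py | PUM
-- ===== SOURCE A (Python) =====
-- def PUM(x, mult):
--     res = []
--     aux = 1
--     frase = ""
--     for i in range(x):
--         frase = ""
--         for j in range(aux, aux+mult-1):
--             aux = j
--             frase += str(j) + " "
--         aux += 2
--         frase += "PUM"
--         res.append(frase)
--     return res
-- ===== SOURCE B (Python) =====
-- def PUM(x, mult):
--     # row i starts at 1 + i*mult in closed form; mult <= 1 gives an empty number list, so the row is just "PUM"
--     return [' '.join([str(j) for j in range(1 + i * mult, i * mult + mult)] + ['PUM'])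
--             for i in range(x)]
-- ===== Notes on version B (the rewrite author's own statement) =====
-- stated objective: simpler
-- what changed: B drops A's threaded aux accumulator and per-character string mutation: each row's starting number is computed in closed form as 1+i*mult and the row is built as ' '.join of a comprehension plus ['PUM'].
import Mathlib
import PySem

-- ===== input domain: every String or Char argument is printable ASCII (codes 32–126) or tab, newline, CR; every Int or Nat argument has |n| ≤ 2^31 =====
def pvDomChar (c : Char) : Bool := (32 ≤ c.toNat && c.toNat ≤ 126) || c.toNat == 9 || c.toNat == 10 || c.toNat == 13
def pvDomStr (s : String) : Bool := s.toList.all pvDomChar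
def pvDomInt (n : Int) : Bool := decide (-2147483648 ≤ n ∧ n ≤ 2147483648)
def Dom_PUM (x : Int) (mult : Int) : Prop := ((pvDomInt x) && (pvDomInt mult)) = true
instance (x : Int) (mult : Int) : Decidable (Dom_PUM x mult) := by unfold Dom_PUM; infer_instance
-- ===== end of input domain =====

-- B replaces A's threaded `aux` accumulator with a closed-form row start 1 + i*mult and a join of a comprehension (simpler).

-- ===== PORT A =====
-- outer loop threads (res, aux); frase is rebuilt from "" each row by the inner fold, which also sets aux = j
def PUM (x : Int) (mult : Int) : List String :=
  ((PySem.List.pyRange 0 x 1).foldl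
    (fun (st : List String × Int) _i =>
      (st.1 ++ [((PySem.List.pyRange st.2 (st.2 + mult - 1) 1).foldl
                  (fun (q : Int × String) j => (j, q.2 ++ PySem.Int.toStr j ++ " "))
                  (st.2, "")).2 ++ "PUM"],
       ((PySem.List.pyRange st.2 (st.2 + mult - 1) 1).foldl
                  (fun (q : Int × String) j => (j, q.2 ++ PySem.Int.toStr j ++ " "))
                  (st.2, "")).1 + 2))
    ([], 1)).1

-- ===== PORT B =====
def PUM_alt (x : Int) (mult : Int) : List String :=
  (PySem.List.pyRange 0 x 1).map (fun i =>
    PySem.Str.join " "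
      ((PySem.List.pyRange (1 + i * mult) (i * mult + mult) 1).map PySem.Int.toStr ++ ["PUM"]))

-- ===== PRECONDITION & SPEC =====
def Spec_PUM (x : Int) (mult : Int) (out : List String) : Prop := out = PUM_alt x mult
instance (x : Int) (mult : Int) (out : List String) : Decidable (Spec_PUM x mult out) := by unfold Spec_PUM; infer_instance

-- ===== CLAIM (what is proved, stated in full; the proofs are below) =====
def Claim_equal_PUM : Prop := ∀ (x : Int) (mult : Int), Dom_PUM x mult → Spec_PUM x mult (PUM x mult)

-- ===== LEMMAS AND PROOFS =====

def pvRow (mult start : Int) : String :=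
  PySem.Str.join " " ((PySem.List.pyRange start (start + mult - 1) 1).map PySem.Int.toStr ++ ["PUM"])

-- the inner fold's first component depends only on the list (it is the last element, or q0)
theorem pv_fst_fold (js : List Int) (q0 : Int) (s0 : String) :
    ((js.foldl (fun (q : Int × String) j => (j, q.2 ++ PySem.Int.toStr j ++ " ")) (q0, s0))).1
      = js.foldl (fun _ j => j) q0 := by
  induction js generalizing q0 s0 with
  | nil => rfl
  | cons j js ih => simpa using ih j (s0 ++ PySem.Int.toStr j ++ " ")

theorem pv_last_range (a b q0 : Int) (h : a < b) :
    (PySem.List.pyRange a b 1).foldl (fun _ j => j) q0 = b - 1 := by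
  have h1 : a ≤ b - 1 := by omega
  have hsplit := PySem.List.pyRange_one_succ_right (a := a) (b := b - 1) h1
  rw [show b - 1 + 1 = b by ring] at hsplit
  rw [hsplit, List.foldl_append]
  simp

theorem pv_snd_fold (js : List Int) (q0 : Int) (s0 : String) :
    ((js.foldl (fun (q : Int × String) j => (j, q.2 ++ PySem.Int.toStr j ++ " ")) (q0, s0))).2 ++ "PUM"
      = s0 ++ PySem.Str.join " " (js.map PySem.Int.toStr ++ ["PUM"]) := by
  induction js generalizing q0 s0 with
  | nil =>
    apply String.toList_injective
    simp [PySem.Str.join, PySem.Chars.join_singleton]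
  | cons j js ih =>
    have := ih j (s0 ++ PySem.Int.toStr j ++ " ")
    simp only [List.foldl_cons, List.map_cons] at *
    rw [this]
    apply String.toList_injective
    rcases hj : js.map PySem.Int.toStr ++ ["PUM"] with _ | ⟨c, cs⟩
    · simp at hj
    · simp [hj, PySem.Str.join, PySem.Chars.join_cons_cons]

-- one row of A at a given aux is B's row at start = aux
theorem pv_rowA (aux mult : Int) :
    (((PySem.List.pyRange aux (aux + mult - 1) 1).foldl
        (fun (q : Int × String) j => (j, q.2 ++ PySem.Int.toStr j ++ " ")) (aux, ""))).2 ++ "PUM"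
      = pvRow mult aux := by
  have := pv_snd_fold (PySem.List.pyRange aux (aux + mult - 1) 1) aux ""
  rw [pvRow]
  simpa using this

-- A's outer fold, case mult ≥ 2: aux advances by exactly mult each row
theorem pv_outer_ge (mult : Int) (hm : 2 ≤ mult) (l : List Int) (acc : List String) (aux : Int) :
    l.foldl
      (fun (st : List String × Int) _i =>
        (st.1 ++ [((PySem.List.pyRange st.2 (st.2 + mult - 1) 1).foldl
                    (fun (q : Int × String) j => (j, q.2 ++ PySem.Int.toStr j ++ " "))
                    (st.2, "")).2 ++ "PUM"],
         ((PySem.List.pyRange st.2 (st.2 + mult - 1) 1).foldl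
                    (fun (q : Int × String) j => (j, q.2 ++ PySem.Int.toStr j ++ " "))
                    (st.2, "")).1 + 2))
      (acc, aux)
    = (acc ++ (List.range l.length).map (fun (k : Nat) => pvRow mult (aux + (k : Int) * mult)),
       aux + (l.length : Int) * mult) := by
  induction l generalizing acc aux with
  | nil => simp
  | cons i l ih =>
    have hlt : aux < aux + mult - 1 := by omega
    simp only [List.foldl_cons]
    rw [pv_rowA, pv_fst_fold, pv_last_range _ _ _ hlt,
        show aux + mult - 1 - 1 + 2 = aux + mult by ring, ih]
    refine Prod.ext ?_ (by push_cast [List.length_cons]; ring)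
    simp only [List.length_cons, List.range_succ_eq_map, List.map_cons, List.map_map,
               List.append_assoc, List.singleton_append]
    congr 1
    norm_num
    intro a _
    congr 1
    ring

-- A's outer fold, case mult ≤ 1: every inner range is empty and every row is "PUM"
theorem pv_outer_lt (mult : Int) (hm : mult < 2) (l : List Int) (acc : List String) (aux : Int) :
    (l.foldl
      (fun (st : List String × Int) _i =>
        (st.1 ++ [((PySem.List.pyRange st.2 (st.2 + mult - 1) 1).foldl
                    (fun (q : Int × String) j => (j, q.2 ++ PySem.Int.toStr j ++ " "))
                    (st.2, "")).2 ++ "PUM"],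
         ((PySem.List.pyRange st.2 (st.2 + mult - 1) 1).foldl
                    (fun (q : Int × String) j => (j, q.2 ++ PySem.Int.toStr j ++ " "))
                    (st.2, "")).1 + 2))
      (acc, aux)).1
    = acc ++ List.replicate l.length "PUM" := by
  induction l generalizing acc aux with
  | nil => simp
  | cons i l ih =>
    have he : PySem.List.pyRange aux (aux + mult - 1) 1 = [] :=
      PySem.List.pyRange_one_eq_nil (by omega)
    simp only [List.foldl_cons, he, List.foldl_nil]
    rw [ih]
    simp [List.replicate_succ]

theorem pv_row_empty (mult start : Int) (hm : mult < 2) : pvRow mult start = "PUM" := by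
  unfold pvRow
  rw [PySem.List.pyRange_one_eq_nil (by omega)]
  apply String.toList_injective
  simp [PySem.Str.join, PySem.Chars.join_singleton]

theorem pv_alt_row (i mult : Int) :
    PySem.Str.join " "
        ((PySem.List.pyRange (1 + i * mult) (i * mult + mult) 1).map PySem.Int.toStr ++ ["PUM"])
      = pvRow mult (1 + i * mult) := by
  unfold pvRow
  congr 2
  ring

-- ===== VERDICT (by name: the statement is the Claim_ definition above) =====
theorem PUM_spec : Claim_equal_PUM := by
  intro x mult _
  unfold Spec_PUM PUM PUM_alt
  by_cases hm : 2 ≤ mult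
  · rw [pv_outer_ge mult hm]
    rw [PySem.List.pyRange_one 0 x]
    simp only [List.map_map, List.length_map, List.length_range, List.nil_append]
    apply List.map_congr_left
    intro k _
    simp only [Function.comp_apply]
    rw [pv_alt_row]
    congr 1
    ring
  · rw [pv_outer_lt mult (by omega), List.nil_append]
    refine (List.eq_replicate_iff.mpr ⟨by simp, ?_⟩).symm
    intro s hs
    simp only [List.mem_map] at hs
    obtain ⟨i, _, hi⟩ := hs
    rw [← hi, pv_alt_row, pv_row_empty _ _ (by omega)]
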